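-- pv_equiv track=rewrite | github.com/almarbo3i/problem-of-the-day | week2_day2.py | pathway
-- ===== SOURCE A (Python) =====
-- def pathway(distance):
--     directions = [(0, 1), (-1, 0), (0, -1), (1, 0)]
--     visited = set()
--
--     #start point
--     x = 0
--     y = 0
--     visited.add((x, y))
--
--     for i in range(len(distance)):
--         direction = directions[i % 4]  # Get the current direction
--         for _ in range(distance[i]):
--             x += direction[0]
--             y += direction[1]
--             if (x, y) in visited:
--                 return True
--             visited.add((x, y))
--
--     return False
-- ===== SOURCE B (Python) =====
-- def pathway(distance):
--     # Work per segment, not per unit step: each walked segment is a degenerate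
--     # axis-aligned box of lattice points; the path self-intersects iff some new
--     # segment's box overlaps an earlier one's (or the origin's).
--     dirs = [(0, 1), (-1, 0), (0, -1), (1, 0)]
--     boxes = [(0, 0, 0, 0)]  # visited points, as (xlo, xhi, ylo, yhi) boxes
--     x = y = 0
--     for i, d in enumerate(distance):
--         if d > 0:
--             dx, dy = dirs[i % 4]
--             nx, ny = x + dx * d, y + dy * d
--             box = (min(x + dx, nx), max(x + dx, nx), min(y + dy, ny), max(y + dy, ny))
--             if any(box[0] <= b and a <= box[1] and box[2] <= e and c <= box[3]
--                    for (a, b, c, e) in boxes):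
--                 return True
--             boxes.append(box)
--             x, y = nx, ny
--     return False
-- ===== Notes on version B (the rewrite author's own statement) =====
-- stated objective: faster
-- what changed: B works per segment instead of per unit step: each walked segment is a degenerate axis-aligned box of lattice points and the path self-intersects iff a new segment's box overlaps an earlier segment's box (interval-overlap test), so the per-point visited-set simulation disappears.
import Mathlib
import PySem

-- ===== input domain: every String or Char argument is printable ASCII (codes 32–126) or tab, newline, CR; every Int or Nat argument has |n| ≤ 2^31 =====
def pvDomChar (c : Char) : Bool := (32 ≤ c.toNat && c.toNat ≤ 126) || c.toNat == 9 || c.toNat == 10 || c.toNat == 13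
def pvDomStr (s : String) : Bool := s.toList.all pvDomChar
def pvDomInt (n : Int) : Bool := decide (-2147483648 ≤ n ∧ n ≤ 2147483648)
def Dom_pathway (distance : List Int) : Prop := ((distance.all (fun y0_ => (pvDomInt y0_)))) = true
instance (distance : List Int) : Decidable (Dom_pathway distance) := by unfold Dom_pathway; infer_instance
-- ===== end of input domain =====

-- B detects the self-intersection per segment — each walked segment is a degenerate
-- axis-aligned box of lattice points, and the path crosses itself iff a new segment's box
-- overlaps an earlier one's — instead of A's unit-step simulation over every lattice point.

-- ===== PORT A =====
def pathwayDirs : List (Int × Int) := [(0, 1), (-1, 0), (0, -1), (1, 0)]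

-- directions[i % 4]: the index is always within 0..3, so the .getD default is never used
def pathwayDir (i : Int) : Int × Int :=
  (PySem.List.pyGet? pathwayDirs (PySem.Int.mod i 4)).getD (0, 0)

-- A's inner 'for _ in range(distance[i])': it runs max(distance[i],0) times and 'return
-- True' leaves the function, so it is recursion on the trip count with early exit (none =
-- 'return True'); Python's lazy range(n) is never materialised, exactly like the source
def pathwayInner (dir : Int × Int) : Nat → Int → Int → PySem.Set (Int × Int) →
    Option (Int × Int × PySem.Set (Int × Int))
  | 0, x, y, visited => some (x, y, visited)
  | Nat.succ n, x, y, visited =>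
    let x' := x + dir.1
    let y' := y + dir.2
    if PySem.Set.contains visited (x', y') then none
    else pathwayInner dir n x' y' (PySem.Set.add visited (x', y'))

def pathwaySeg (dir : Int × Int) (d : Int)
    (st : Option (Int × Int × PySem.Set (Int × Int))) :
    Option (Int × Int × PySem.Set (Int × Int)) :=
  match st with
  | none => none
  | some (x, y, visited) => pathwayInner dir d.toNat x y visited

def pathway (distance : List Int) : Bool :=
  ((PySem.List.pyRange 0 (distance.length : Int)).foldl
    (fun st i => pathwaySeg (pathwayDir i) (PySem.List.pyGetD distance i 0) st)
    (some (0, 0, PySem.Set.add PySem.Set.empty ((0 : Int), (0 : Int))))).isNone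

-- ===== PORT B =====
def pathwayAltDirs : List (Int × Int) := [(0, 1), (-1, 0), (0, -1), (1, 0)]

def pathwayAltDir (i : Int) : Int × Int :=
  (PySem.List.pyGet? pathwayAltDirs (PySem.Int.mod i 4)).getD (0, 0)

-- the predicate of B's 'any(box[0] <= b and a <= box[1] and box[2] <= e and c <= box[3] …)'
def pathwayAltOverlap (box b2 : Int × Int × Int × Int) : Bool :=
  decide (box.1 ≤ b2.2.1) && decide (b2.1 ≤ box.2.1) &&
    decide (box.2.2.1 ≤ b2.2.2.2) && decide (b2.2.2.1 ≤ box.2.2.2)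

-- one iteration of B's 'for i, d in enumerate(distance)'; none = 'return True' taken
def pathwayAltStep (st : Option (List (Int × Int × Int × Int) × Int × Int)) (p : Int × Int) :
    Option (List (Int × Int × Int × Int) × Int × Int) :=
  match st with
  | none => none
  | some (boxes, x, y) =>
    if p.2 > 0 then
      let dir := pathwayAltDir p.1
      let nx := x + dir.1 * p.2
      let ny := y + dir.2 * p.2
      let box := (min (x + dir.1) nx, max (x + dir.1) nx,
                  min (y + dir.2) ny, max (y + dir.2) ny)
      if boxes.any (fun b => pathwayAltOverlap box b) then none
      else some (boxes ++ [box], nx, ny)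
    else some (boxes, x, y)

def pathway_alt (distance : List Int) : Bool :=
  ((PySem.List.enumerate distance 0).foldl pathwayAltStep
    (some ([((0 : Int), (0 : Int), (0 : Int), (0 : Int))], (0 : Int), (0 : Int)))).isNone

-- ===== PRECONDITION & SPEC =====
def Spec_pathway (distance : List Int) (out : Bool) : Prop := out = pathway_alt distance
instance (distance : List Int) (out : Bool) : Decidable (Spec_pathway distance out) := by unfold Spec_pathway; infer_instance

-- ===== CLAIM (what is proved, stated in full; the proofs are below) =====
def Claim_equal_pathway : Prop := ∀ (distance : List Int), Dom_pathway distance → Spec_pathway distance (pathway distance)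

-- ===== LEMMAS AND PROOFS =====

-- the points of one walked segment (k-th step lands on (x + dx*(k+1), y + dy*(k+1)))
def segPts (dir : Int × Int) (x y : Int) (m : Nat) : List (Int × Int) :=
  (List.range m).map (fun (k : Nat) => (x + dir.1 * ((k : Int) + 1), y + dir.2 * ((k : Int) + 1)))

-- the lattice points of a box (xlo, xhi, ylo, yhi)
def inBox (b : Int × Int × Int × Int) (p : Int × Int) : Prop :=
  b.1 ≤ p.1 ∧ p.1 ≤ b.2.1 ∧ b.2.2.1 ≤ p.2 ∧ p.2 ≤ b.2.2.2

def boxNE (b : Int × Int × Int × Int) : Prop := b.1 ≤ b.2.1 ∧ b.2.2.1 ≤ b.2.2.2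

-- the direction is always one of the four unit vectors
theorem dirCases (i : Int) :
    pathwayDir i = (0, 1) ∨ pathwayDir i = (-1, 0) ∨
    pathwayDir i = (0, -1) ∨ pathwayDir i = (1, 0) := by
  have h0 : (0 : Int) ≤ PySem.Int.mod i 4 := PySem.Int.mod_nonneg i (by norm_num)
  have h1 : PySem.Int.mod i 4 < 4 := PySem.Int.mod_lt i (by norm_num)
  have : PySem.Int.mod i 4 = 0 ∨ PySem.Int.mod i 4 = 1 ∨
      PySem.Int.mod i 4 = 2 ∨ PySem.Int.mod i 4 = 3 := by omega
  unfold pathwayDir pathwayDirs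
  rcases this with h | h | h | h <;> rw [h] <;> simp [PySem.List.pyGet?, PySem.List.pyIdx?]

theorem mem_segPts (dir : Int × Int) (x y : Int) (m : Nat) (p : Int × Int) :
    p ∈ segPts dir x y m ↔
      ∃ k : Nat, k < m ∧ p = (x + dir.1 * ((k : Int) + 1), y + dir.2 * ((k : Int) + 1)) := by
  simp [segPts, List.mem_map, List.mem_range, eq_comm]

theorem segPts_nodup (dir : Int × Int)
    (hdir : dir = (0, 1) ∨ dir = (-1, 0) ∨ dir = (0, -1) ∨ dir = (1, 0))
    (x y : Int) (m : Nat) : (segPts dir x y m).Nodup := by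
  unfold segPts
  refine List.Nodup.map ?_ (List.nodup_range)
  intro k1 k2 h
  rcases hdir with rfl | rfl | rfl | rfl <;>
    simp only [Prod.mk.injEq] at h <;> omega

-- with d > 0, the segment's points are exactly the lattice points of B's box
theorem segPts_box (dir : Int × Int)
    (hdir : dir = (0, 1) ∨ dir = (-1, 0) ∨ dir = (0, -1) ∨ dir = (1, 0))
    (x y d : Int) (hd : 0 < d) (p : Int × Int) :
    p ∈ segPts dir x y d.toNat ↔
      inBox (min (x + dir.1) (x + dir.1 * d), max (x + dir.1) (x + dir.1 * d),
             min (y + dir.2) (y + dir.2 * d), max (y + dir.2) (y + dir.2 * d)) p := by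
  rw [mem_segPts]
  unfold inBox
  rcases p with ⟨px, py⟩
  rcases hdir with rfl | rfl | rfl | rfl <;>
    simp only [Prod.mk.injEq] <;>
    constructor
  · rintro ⟨k, hk, rfl, rfl⟩; simp; omega
  · rintro ⟨h1, h2, h3, h4⟩
    exact ⟨(py - y - 1).toNat, by simp at h1 h2 h3 h4 ⊢; omega,
      by simp at h1 h2 h3 h4 ⊢; omega⟩
  · rintro ⟨k, hk, rfl, rfl⟩; simp; omega
  · rintro ⟨h1, h2, h3, h4⟩
    exact ⟨(x - px - 1).toNat, by simp at h1 h2 h3 h4 ⊢; omega,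
      by simp at h1 h2 h3 h4 ⊢; omega⟩
  · rintro ⟨k, hk, rfl, rfl⟩; simp; omega
  · rintro ⟨h1, h2, h3, h4⟩
    exact ⟨(y - py - 1).toNat, by simp at h1 h2 h3 h4 ⊢; omega,
      by simp at h1 h2 h3 h4 ⊢; omega⟩
  · rintro ⟨k, hk, rfl, rfl⟩; simp; omega
  · rintro ⟨h1, h2, h3, h4⟩
    exact ⟨(px - x - 1).toNat, by simp at h1 h2 h3 h4 ⊢; omega,
      by simp at h1 h2 h3 h4 ⊢; omega⟩

theorem box_ne (dir : Int × Int)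
    (hdir : dir = (0, 1) ∨ dir = (-1, 0) ∨ dir = (0, -1) ∨ dir = (1, 0))
    (x y d : Int) (hd : 0 < d) :
    boxNE (min (x + dir.1) (x + dir.1 * d), max (x + dir.1) (x + dir.1 * d),
           min (y + dir.2) (y + dir.2 * d), max (y + dir.2) (y + dir.2 * d)) := by
  rcases hdir with rfl | rfl | rfl | rfl <;> unfold boxNE <;> simp <;> omega

-- two nonempty boxes of lattice points meet iff their coordinate intervals overlap
theorem overlap_iff (b1 b2 : Int × Int × Int × Int) (h1 : boxNE b1) (h2 : boxNE b2) :
    pathwayAltOverlap b1 b2 = true ↔ ∃ p, inBox b1 p ∧ inBox b2 p := by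
  unfold pathwayAltOverlap inBox boxNE at *
  simp only [Bool.and_eq_true, decide_eq_true_eq]
  constructor
  · rintro ⟨⟨⟨ha, hb⟩, hc⟩, hdd⟩
    exact ⟨(max b1.1 b2.1, max b1.2.2.1 b2.2.2.1), by omega, by omega⟩
  · rintro ⟨p, hp1, hp2⟩
    omega

theorem segPts_shift (dir : Int × Int) (x y : Int) (m : Nat) :
    segPts dir x y (m + 1) =
      (x + dir.1, y + dir.2) :: segPts dir (x + dir.1) (y + dir.2) m := by
  unfold segPts
  rw [List.range_succ_eq_map, List.map_cons, List.map_map]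
  congr 1
  · simp only [Nat.cast_zero, zero_add, Prod.mk.injEq]
    constructor <;> ring
  · apply List.map_congr_left
    intro k _
    simp only [Function.comp_apply, Prod.mk.injEq]
    push_cast
    constructor <;> ring

-- A's inner loop, started from a duplicate-free visited list, appends exactly the
-- segment's points — or returns none exactly when one of them was already visited
theorem inner_core (dir : Int × Int) :
    ∀ (m : Nat) (x y : Int) (pts : List (Int × Int)), pts.Nodup →
      pathwayInner dir m x y pts =
        if (pts ++ segPts dir x y m).Nodup then
          some (x + dir.1 * m, y + dir.2 * m, pts ++ segPts dir x y m)
        else none := by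
  intro m
  induction m with
  | zero =>
    intro x y pts h
    simp [pathwayInner, segPts, h]
  | succ m ih =>
    intro x y pts h
    rw [segPts_shift]
    unfold pathwayInner
    simp only []
    by_cases hmem : (x + dir.1, y + dir.2) ∈ pts
    · have hc : PySem.Set.contains pts (x + dir.1, y + dir.2) = true :=
        (PySem.Set.contains_iff _ _).mpr hmem
      rw [hc, if_pos rfl]
      have : ¬ (pts ++ (x + dir.1, y + dir.2) :: segPts dir (x + dir.1) (y + dir.2) m).Nodup := by
        intro hn
        rw [List.append_cons pts _ (segPts dir (x + dir.1) (y + dir.2) m)] at hn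
        have h2 := hn.sublist ((pts ++ [(x + dir.1, y + dir.2)]).sublist_append_left _)
        exact List.disjoint_of_nodup_append h2 hmem (List.mem_singleton_self _)
      rw [if_neg this]
    · have hc : PySem.Set.contains pts (x + dir.1, y + dir.2) = false := by
        rw [Bool.eq_false_iff]
        intro hcon
        exact hmem ((PySem.Set.contains_iff _ _).mp hcon)
      rw [hc]
      simp only [Bool.false_eq_true, if_false]
      rw [PySem.Set.add_of_not_mem hmem]
      have hnd : (pts ++ [(x + dir.1, y + dir.2)]).Nodup :=
        List.Nodup.append h (List.nodup_singleton _) (List.disjoint_singleton.mpr hmem)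
      rw [ih (x + dir.1) (y + dir.2) (pts ++ [(x + dir.1, y + dir.2)]) hnd]
      rw [List.append_cons pts (x + dir.1, y + dir.2) (segPts dir (x + dir.1) (y + dir.2) m)]
      have hxe : x + dir.1 + dir.1 * (m : Int) = x + dir.1 * ((m : Nat) + 1 : Nat) := by
        push_cast; ring
      have hye : y + dir.2 + dir.2 * (m : Int) = y + dir.2 * ((m : Nat) + 1 : Nat) := by
        push_cast; ring
      rw [hxe, hye]

theorem seg_none (dir : Int × Int) (d : Int) : pathwaySeg dir d none = none := rfl

theorem seg_eval (dir : Int × Int) (d x y : Int) (pts : List (Int × Int)) (h : pts.Nodup) :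
    pathwaySeg dir d (some (x, y, pts)) =
      if (pts ++ segPts dir x y d.toNat).Nodup then
        some (x + dir.1 * (d.toNat : Int), y + dir.2 * (d.toNat : Int), pts ++ segPts dir x y d.toNat)
      else none := by
  unfold pathwaySeg
  exact inner_core dir d.toNat x y pts h

-- A's outer fold over range(len(distance)) with lookups = fold over enumerate(distance)
theorem outer_to_enum :
    ∀ (xs : List Int) (a : Nat) (st : Option (Int × Int × PySem.Set (Int × Int))),
      (PySem.List.pyRange (a : Int) ((a : Int) + xs.length)).foldl
        (fun st i => pathwaySeg (pathwayDir i) (PySem.List.pyGetD xs (i - (a : Int)) 0) st) st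
      = (PySem.List.enumerate xs (a : Int)).foldl
          (fun st p => pathwaySeg (pathwayDir p.1) p.2 st) st := by
  intro xs
  induction xs with
  | nil =>
    intro a st
    rw [show ((a : Int) + ([] : List Int).length) = (a : Int) by simp]
    rw [PySem.List.pyRange_one_eq_nil le_rfl]
    simp [PySem.List.enumerate]
  | cons v l ih =>
    intro a st
    have hlt : (a : Int) < (a : Int) + ((v :: l).length : Int) := by
      rw [List.length_cons]; push_cast; omega
    rw [PySem.List.pyRange_one_cons hlt, PySem.List.enumerate_cons]
    simp only [List.foldl_cons]
    have h0 : PySem.List.pyGetD (v :: l) ((a : Int) - (a : Int)) 0 = v := by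
      rw [show ((a : Int) - (a : Int)) = ((0 : Nat) : Int) by simp]
      rw [PySem.List.pyGetD_natCast]; rfl
    rw [h0]
    set st' := pathwaySeg (pathwayDir a) v st with hst'
    have hb : (a : Int) + ((v :: l).length : Int) = ((a : Int) + 1) + (l.length : Int) := by
      rw [List.length_cons]; push_cast; ring
    rw [hb]
    have hcongr : ∀ (acc : Option (Int × Int × PySem.Set (Int × Int))) (i : Int),
        i ∈ PySem.List.pyRange ((a : Int) + 1) (((a : Int) + 1) + (l.length : Int)) →
        (fun st i => pathwaySeg (pathwayDir i) (PySem.List.pyGetD (v :: l) (i - (a : Int)) 0) st) acc i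
        = (fun st i => pathwaySeg (pathwayDir i) (PySem.List.pyGetD l (i - ((a : Int) + 1)) 0) st) acc i := by
      intro acc i hi
      have hia : (a : Int) + 1 ≤ i := (PySem.List.mem_pyRange_one.mp hi).1
      simp only
      congr 1
      set k : Nat := (i - ((a : Int) + 1)).toNat with hk
      have h1 : i - (a : Int) = ((k + 1 : Nat) : Int) := by omega
      have h2 : i - ((a : Int) + 1) = (k : Int) := by omega
      rw [h1, h2, PySem.List.pyGetD_natCast, PySem.List.pyGetD_natCast]
      rfl
    rw [PySem.List.foldl_congr_mem _ _ _ st' hcongr]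
    have hih := ih (a + 1) st'
    push_cast at hih
    exact hih

theorem afold_none (l : List (Int × Int)) :
    l.foldl (fun st p => pathwaySeg (pathwayDir p.1) p.2 st) none = none := by
  induction l with
  | nil => rfl
  | cons p l ih => simpa [seg_none] using ih

theorem bfold_none (l : List (Int × Int)) :
    l.foldl pathwayAltStep none = none := by
  induction l with
  | nil => rfl
  | cons p l ih => simpa [pathwayAltStep] using ih

theorem altStep_some (boxes : List (Int × Int × Int × Int)) (x y : Int) (p : Int × Int) :
    pathwayAltStep (some (boxes, x, y)) p =
      if p.2 > 0 then
        (if boxes.any (fun b => pathwayAltOverlap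
              (min (x + (pathwayDir p.1).1) (x + (pathwayDir p.1).1 * p.2),
               max (x + (pathwayDir p.1).1) (x + (pathwayDir p.1).1 * p.2),
               min (y + (pathwayDir p.1).2) (y + (pathwayDir p.1).2 * p.2),
               max (y + (pathwayDir p.1).2) (y + (pathwayDir p.1).2 * p.2)) b) = true then none
         else some (boxes ++
              [(min (x + (pathwayDir p.1).1) (x + (pathwayDir p.1).1 * p.2),
                max (x + (pathwayDir p.1).1) (x + (pathwayDir p.1).1 * p.2),
                min (y + (pathwayDir p.1).2) (y + (pathwayDir p.1).2 * p.2),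
                max (y + (pathwayDir p.1).2) (y + (pathwayDir p.1).2 * p.2))],
              x + (pathwayDir p.1).1 * p.2, y + (pathwayDir p.1).2 * p.2))
      else some (boxes, x, y) := rfl

-- the simulation invariant: A's visited set holds exactly the lattice points of B's boxes
def StRel (V : List (Int × Int)) (boxes : List (Int × Int × Int × Int)) : Prop :=
  (∀ p, p ∈ V ↔ ∃ b ∈ boxes, inBox b p) ∧ (∀ b ∈ boxes, boxNE b)

theorem main_inv :
    ∀ (l : List (Int × Int)) (V : List (Int × Int)) (boxes : List (Int × Int × Int × Int))
      (x y : Int), V.Nodup → StRel V boxes →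
      (l.foldl (fun st p => pathwaySeg (pathwayDir p.1) p.2 st) (some (x, y, V))).isNone
      = (l.foldl pathwayAltStep (some (boxes, x, y))).isNone := by
  intro l
  induction l with
  | nil => intro V boxes x y _ _; rfl
  | cons p l ih =>
    intro V boxes x y hV hrel
    simp only [List.foldl_cons]
    have hdir := dirCases p.1
    rw [seg_eval _ _ _ _ _ hV, altStep_some]
    by_cases hd : p.2 > 0
    · rw [if_pos hd]
      set box := (min (x + (pathwayDir p.1).1) (x + (pathwayDir p.1).1 * p.2),
                  max (x + (pathwayDir p.1).1) (x + (pathwayDir p.1).1 * p.2),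
                  min (y + (pathwayDir p.1).2) (y + (pathwayDir p.1).2 * p.2),
                  max (y + (pathwayDir p.1).2) (y + (pathwayDir p.1).2 * p.2)) with hbox
      have hboxne : boxNE box := box_ne _ hdir x y p.2 hd
      have hcond : (V ++ segPts (pathwayDir p.1) x y p.2.toNat).Nodup ↔
          ¬ (boxes.any (fun b => pathwayAltOverlap box b) = true) := by
        rw [List.nodup_append]
        rw [List.any_eq_true]
        constructor
        · rintro ⟨-, -, hdisj⟩ ⟨b, hbmem, hover⟩
          rcases (overlap_iff box b hboxne (hrel.2 b hbmem)).mp hover with ⟨q, hq1, hq2⟩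
          have hqseg : q ∈ segPts (pathwayDir p.1) x y p.2.toNat :=
            (segPts_box _ hdir x y p.2 hd q).mpr hq1
          have hqV : q ∈ V := (hrel.1 q).mpr ⟨b, hbmem, hq2⟩
          exact hdisj q hqV q hqseg rfl
        · intro hno
          refine ⟨hV, segPts_nodup _ hdir x y _, ?_⟩
          intro q hqV q' hq'
          rintro rfl
          rcases (hrel.1 q).mp hqV with ⟨b, hbmem, hqb⟩
          exact hno ⟨b, hbmem, (overlap_iff box b hboxne (hrel.2 b hbmem)).mpr
            ⟨q, (segPts_box _ hdir x y p.2 hd q).mp hq', hqb⟩⟩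
      by_cases hcross : boxes.any (fun b => pathwayAltOverlap box b) = true
      · rw [if_pos hcross]
        rw [if_neg (fun hn => (hcond.mp hn) hcross)]
        rw [afold_none, bfold_none]
        rfl
      · rw [if_neg hcross]
        rw [if_pos (hcond.mpr hcross)]
        have hxy : x + (pathwayDir p.1).1 * (p.2.toNat : Int) = x + (pathwayDir p.1).1 * p.2 ∧
            y + (pathwayDir p.1).2 * (p.2.toNat : Int) = y + (pathwayDir p.1).2 * p.2 := by
          constructor <;> · congr 2; omega
        rw [hxy.1, hxy.2]
        apply ih
        · exact hcond.mpr hcross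
        · constructor
          · intro q
            simp only [List.mem_append, List.mem_singleton]
            rw [hrel.1 q]
            constructor
            · rintro (⟨b, hb, hqb⟩ | hqseg)
              · exact ⟨b, Or.inl hb, hqb⟩
              · exact ⟨box, Or.inr rfl, (segPts_box _ hdir x y p.2 hd q).mp hqseg⟩
            · rintro ⟨b, hb | rfl, hqb⟩
              · exact Or.inl ⟨b, hb, hqb⟩
              · exact Or.inr ((segPts_box _ hdir x y p.2 hd q).mpr hqb)
          · intro b hb
            rcases List.mem_append.mp hb with hb | hb
            · exact hrel.2 b hb
            · rw [List.mem_singleton] at hb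
              subst hb
              exact hboxne
    · rw [if_neg hd]
      have hm : p.2.toNat = 0 := by omega
      rw [hm]
      have hnil : segPts (pathwayDir p.1) x y 0 = [] := rfl
      rw [hnil, List.append_nil]
      rw [if_pos hV]
      have : x + (pathwayDir p.1).1 * ((0 : Nat) : Int) = x ∧
          y + (pathwayDir p.1).2 * ((0 : Nat) : Int) = y := by
        constructor <;> simp
      rw [this.1, this.2]
      exact ih V boxes x y hV hrel

-- ===== VERDICT (by name: the statement is the Claim_ definition above) =====
theorem pathway_spec : Claim_equal_pathway := by
  unfold Claim_equal_pathway
  intro distance _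
  unfold Spec_pathway pathway pathway_alt
  have hinit : PySem.Set.add PySem.Set.empty ((0 : Int), (0 : Int)) = [((0 : Int), (0 : Int))] := rfl
  rw [hinit]
  have hout := outer_to_enum distance 0
    (some ((0 : Int), (0 : Int), ([((0 : Int), (0 : Int))] : PySem.Set (Int × Int))))
  simp only [Nat.cast_zero, zero_add, sub_zero] at hout
  rw [hout]
  apply main_inv
  · exact List.nodup_singleton _
  · constructor
    · intro p
      simp only [List.mem_singleton]
      constructor
      · rintro rfl
        exact ⟨((0 : Int), (0 : Int), (0 : Int), (0 : Int)), rfl, by unfold inBox; simp⟩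
      · rintro ⟨b, rfl, hpb⟩
        simp only [inBox] at hpb
        rcases p with ⟨px, py⟩
        simp only [Prod.mk.injEq]
        omega
    · intro b hb
      rw [List.mem_singleton] at hb
      subst hb
      unfold boxNE
      simp
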